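-- pv_equiv track=rewrite | github.com/sdic-cloud-security-research/barbican | barbican/api/controllers/secrets.py | _is_valid_sorting
-- ===== SOURCE A (Python) =====
-- def _is_valid_sorting(sorting):
--     allowed_keys = ['algorithm', 'bit_length', 'created',
--                     'expiration', 'mode', 'name', 'secret_type', 'status',
--                     'updated']
--     allowed_directions = ['asc', 'desc']
--     sorted_keys = dict()
--     for sort in sorting.split(','):
--         if ':' in sort:
--             try:
--                 key, direction = sort.split(':')
--             except ValueError:
--                 return False
--         else:
--             key, direction = sort, 'asc'
--         if key not in allowed_keys or direction not in allowed_directions: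
--             return False
--         if sorted_keys.get(key):
--             return False
--         else:
--             sorted_keys[key] = direction
--     return True
-- ===== SOURCE B (Python) =====
-- def _is_valid_sorting(sorting):
--     allowed_keys = ['algorithm', 'bit_length', 'created', 'expiration',
--                     'mode', 'name', 'secret_type', 'status', 'updated']
--     token_key = {k + ':' + d: k for k in allowed_keys for d in ('asc', 'desc')}
--     tokens = [t if ':' in t else t + ':asc' for t in sorting.split(',')]
--     if not all(t in token_key for t in tokens):
--         return False
--     keys = [token_key[t] for t in tokens]
--     return len(keys) == len(set(keys))
-- ===== Notes on version B (the rewrite author's own statement) =====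
-- stated objective: alternative
-- what changed: Instead of parsing each part into a key/direction pair and tracking seen keys in a dict, B precomputes the 18-entry table of all valid full tokens (every allowed key joined with each allowed direction), normalises each colon-free comma-part by appending the default ascending direction, validates whole-token membership in that table, recovers keys by table lookup, and detects duplicates once at the end by a set-cardinality comparison.
import Mathlib
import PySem

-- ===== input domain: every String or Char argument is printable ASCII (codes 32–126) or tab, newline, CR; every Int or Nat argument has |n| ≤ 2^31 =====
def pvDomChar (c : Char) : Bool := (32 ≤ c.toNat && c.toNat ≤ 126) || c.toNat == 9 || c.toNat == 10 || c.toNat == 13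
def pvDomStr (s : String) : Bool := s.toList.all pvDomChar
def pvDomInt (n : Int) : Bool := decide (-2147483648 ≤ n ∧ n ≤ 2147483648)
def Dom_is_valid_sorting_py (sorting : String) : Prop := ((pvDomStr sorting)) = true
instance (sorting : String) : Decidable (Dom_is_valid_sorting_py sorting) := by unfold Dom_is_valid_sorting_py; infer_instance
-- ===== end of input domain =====

-- B validates each comma-part as a WHOLE token against a precomputed 18-entry
-- 'key:direction' -> key table (normalising colon-free parts by appending ':asc'),
-- with no per-part parsing; duplicates are detected once at the end by a
-- set-cardinality comparison. Same return value as A everywhere (objective: alternative).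

-- ===== PORT A =====
def pvAllowedKeysA : List (List Char) :=
  ["algorithm".toList, "bit_length".toList, "created".toList, "expiration".toList,
   "mode".toList, "name".toList, "secret_type".toList, "status".toList, "updated".toList]

def pvAllowedDirectionsA : List (List Char) := ["asc".toList, "desc".toList]

-- the for-loop of A: sorted_keys is the dict, early `return False` = result false.
-- `if sorted_keys.get(key):` ported as getD with default [] — none and a stored empty
-- string are equally falsy, and stored directions ('asc'/'desc') are truthy; exact here.
def pvALoop (d : PySem.Dict (List Char) (List Char)) : List (List Char) → Bool
  | [] => true
  | sort :: rest =>
    let kd : Option (List Char × List Char) :=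
      if PySem.Chars.isIn [':'] sort then
        match PySem.Chars.splitOn sort [':'] with
        | [key, direction] => some (key, direction)   -- 2-tuple unpacking succeeds
        | _ => none                                   -- ValueError → return False
      else some (sort, "asc".toList)
    match kd with
    | none => false
    | some (key, direction) =>
      if !(pvAllowedKeysA.contains key) || !(pvAllowedDirectionsA.contains direction) then
        false
      else if (d.getD key []) ≠ [] then
        false
      else
        pvALoop (d.insert key direction) rest

def is_valid_sorting_py (sorting : String) : Bool :=
  pvALoop PySem.Dict.empty (PySem.Chars.splitOn sorting.toList [','])

-- ===== PORT B =====
def pvAllowedKeysB : List (List Char) :=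
  ["algorithm".toList, "bit_length".toList, "created".toList, "expiration".toList,
   "mode".toList, "name".toList, "secret_type".toList, "status".toList, "updated".toList]

-- the dict comprehension {k + ':' + d: k for k in allowed_keys for d in ('asc','desc')}
def pvTokenTable : PySem.Dict (List Char) (List Char) :=
  (pvAllowedKeysB.flatMap (fun k =>
      (["asc".toList, "desc".toList]).map (fun dir => (k ++ ':' :: dir, k)))).foldl
    (fun dd p => dd.insert p.1 p.2) PySem.Dict.empty

-- `t if ':' in t else t + ':asc'`
def pvNorm (t : List Char) : List Char :=
  if PySem.Chars.isIn [':'] t then t else t ++ ":asc".toList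

-- token_key[t] is only evaluated after `all(t in token_key …)`, so getD is exact here
def is_valid_sorting_py_alt (sorting : String) : Bool :=
  let tokens := (PySem.Chars.splitOn sorting.toList [',']).map pvNorm
  if tokens.all (fun t => pvTokenTable.contains t) then
    let keys := tokens.map (fun t => pvTokenTable.getD t [])
    decide ((keys.length : Int) = PySem.Set.len (PySem.Set.ofList keys))
  else false

-- ===== PRECONDITION & SPEC =====
def Spec_is_valid_sorting_py (sorting : String) (out : Bool) : Prop := out = is_valid_sorting_py_alt sorting
instance (sorting : String) (out : Bool) : Decidable (Spec_is_valid_sorting_py sorting out) := by unfold Spec_is_valid_sorting_py; infer_instance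

-- ===== CLAIM (what is proved, stated in full; the proofs are below) =====
def Claim_equal_is_valid_sorting_py : Prop := ∀ (sorting : String), Dom_is_valid_sorting_py sorting → Spec_is_valid_sorting_py sorting (is_valid_sorting_py sorting)

-- ===== LEMMAS AND PROOFS =====

-- recursive reference splitter: pvSplit c s = s.split(c)
def pvSplit (c : Char) : List Char → List (List Char)
  | [] => [[]]
  | x :: xs =>
    if x = c then [] :: pvSplit c xs
    else (x :: (pvSplit c xs).headI) :: (pvSplit c xs).tail

theorem pvSplit_ne_nil (c : Char) (l : List Char) : pvSplit c l ≠ [] := by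
  cases l with
  | nil => simp [pvSplit]
  | cons x xs => by_cases h : x = c <;> simp [pvSplit, h]

theorem pvSplit_cons_self (c : Char) (l : List Char) :
    (pvSplit c l).headI :: (pvSplit c l).tail = pvSplit c l := by
  cases h : pvSplit c l with
  | nil => exact absurd h (pvSplit_ne_nil c l)
  | cons a t => simp

theorem pv_go_eq (c : Char) : ∀ (l : List Char) (fuel : Nat) (cur : List Char)
    (acc : List (List Char)), l.length < fuel →
    PySem.Chars.splitOn.go [c] fuel l cur acc
      = acc.reverse ++ ((cur.reverse ++ (pvSplit c l).headI) :: (pvSplit c l).tail) := by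
  intro l
  induction l with
  | nil => intro fuel cur acc h; cases fuel <;> simp [PySem.Chars.splitOn.go, pvSplit]
  | cons x xs ih =>
    intro fuel cur acc h
    cases fuel with
    | zero => omega
    | succ f =>
      by_cases hx : c = x
      · subst hx
        have hstep : PySem.Chars.splitOn.go [c] (f+1) (c::xs) cur acc
            = PySem.Chars.splitOn.go [c] f xs [] (cur.reverse :: acc) := by
          simp [PySem.Chars.splitOn.go, List.isPrefixOf]
        rw [hstep, ih f [] (cur.reverse :: acc) (by simpa using Nat.lt_of_succ_lt_succ h)]
        simp [pvSplit, pvSplit_cons_self]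
      · have hpf : [c].isPrefixOf (x :: xs) = false := by
          simp [List.isPrefixOf]; exact fun h' => absurd h' hx
        simp only [PySem.Chars.splitOn.go, hpf, Bool.false_eq_true, if_false]
        rw [ih f (x :: cur) acc (by simpa using Nat.lt_of_succ_lt_succ h)]
        have hx' : ¬ x = c := fun h' => hx h'.symm
        simp [pvSplit, hx']

theorem pv_splitOn_eq (c : Char) (s : List Char) :
    PySem.Chars.splitOn s [c] = pvSplit c s := by
  unfold PySem.Chars.splitOn
  rw [pv_go_eq c s (s.length + 1) [] [] (by omega)]
  simpa using pvSplit_cons_self c s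

theorem pvSplit_length (c : Char) (s : List Char) :
    (pvSplit c s).length = s.count c + 1 := by
  induction s with
  | nil => simp [pvSplit]
  | cons x xs ih =>
    by_cases hx : x = c
    · subst hx; simp [pvSplit, ih]
    · have hlen : (pvSplit c xs).tail.length = (pvSplit c xs).length - 1 := by
        simp [List.length_tail]
      have hpos : 0 < (pvSplit c xs).length :=
        List.length_pos_of_ne_nil (pvSplit_ne_nil c xs)
      have hxc : (x == c) = false := beq_eq_false_iff_ne.mpr hx
      simp only [pvSplit, if_neg hx, List.length_cons, hlen, List.count_cons, hxc,
        Bool.false_eq_true, if_false]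
      omega

theorem pvSplit_of_not_mem (c : Char) (s : List Char) (h : c ∉ s) :
    pvSplit c s = [s] := by
  induction s with
  | nil => simp [pvSplit]
  | cons x xs ih =>
    have hx : ¬ x = c := fun h' => h (h' ▸ List.mem_cons_self ..)
    have hxs : c ∉ xs := fun h' => h (List.mem_cons_of_mem _ h')
    simp [pvSplit, hx, ih hxs]

theorem pvSplit_singleton (c : Char) (s a : List Char) (h : pvSplit c s = [a]) :
    s = a ∧ c ∉ s := by
  have hcnt : s.count c = 0 := by
    have := pvSplit_length c s
    rw [h] at this; simpa using this
  have hmem : c ∉ s := by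
    intro hm
    exact absurd hcnt (Nat.pos_iff_ne_zero.mp (List.count_pos_iff.mpr hm))
  have := pvSplit_of_not_mem c s hmem
  rw [h] at this
  exact ⟨(List.cons.injEq .. ▸ this).1.symm ▸ rfl, hmem⟩

theorem pvSplit_pair (c : Char) : ∀ (s a b : List Char), pvSplit c s = [a, b] →
    s = a ++ c :: b ∧ c ∉ a ∧ c ∉ b := by
  intro s
  induction s with
  | nil => intro a b h; simp [pvSplit] at h
  | cons x xs ih =>
    intro a b h
    by_cases hx : x = c
    · have hstep : pvSplit c (x :: xs) = [] :: pvSplit c xs := by simp [pvSplit, hx]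
      rw [hstep] at h
      simp only [List.cons.injEq] at h
      obtain ⟨ha, hb⟩ := h
      obtain ⟨hxs, hmem⟩ := pvSplit_singleton c xs b hb
      refine ⟨?_, by rw [← ha]; simp, hxs ▸ hmem⟩
      rw [← ha, hx, hxs]
      rfl
    · have hstep : pvSplit c (x :: xs) = (x :: (pvSplit c xs).headI) :: (pvSplit c xs).tail := by
        simp [pvSplit, hx]
      rw [hstep] at h
      simp only [List.cons.injEq] at h
      obtain ⟨ha, ht⟩ := h
      have hsp := pvSplit_cons_self c xs
      rw [ht] at hsp
      obtain ⟨hxs, hha, hhb⟩ := ih (pvSplit c xs).headI b hsp.symm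
      refine ⟨?_, ?_, hhb⟩
      · rw [← ha, List.cons_append]
        exact congrArg (List.cons x) hxs
      · rw [← ha]
        intro hm
        rcases List.mem_cons.mp hm with h' | h'
        · exact hx h'.symm
        · exact hha h'

theorem pv_isIn_singleton (c : Char) (s : List Char) :
    PySem.Chars.isIn [c] s = true ↔ c ∈ s := by
  rw [PySem.Chars.isIn_iff_infix]
  exact List.singleton_infix_iff c s

theorem pv_isIn_false (c : Char) (s : List Char) (h : c ∉ s) :
    PySem.Chars.isIn [c] s = false := by
  rcases hb : PySem.Chars.isIn [c] s with _ | _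
  · rfl
  · exact absurd ((pv_isIn_singleton c s).mp hb) h

theorem pv_isIn_true (c : Char) (s : List Char) (h : c ∈ s) :
    PySem.Chars.isIn [c] s = true := (pv_isIn_singleton c s).mpr h

-- the 18 keys of the token table, spelled out
theorem pv_table_keys : pvTokenTable.keys =
    ["algorithm:asc".toList, "algorithm:desc".toList, "bit_length:asc".toList,
     "bit_length:desc".toList, "created:asc".toList, "created:desc".toList,
     "expiration:asc".toList, "expiration:desc".toList, "mode:asc".toList,
     "mode:desc".toList, "name:asc".toList, "name:desc".toList,
     "secret_type:asc".toList, "secret_type:desc".toList, "status:asc".toList,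
     "status:desc".toList, "updated:asc".toList, "updated:desc".toList] := by
  decide

theorem pv_table_mem (t : List Char) : pvTokenTable.contains t = true ↔
    t ∈ ["algorithm:asc".toList, "algorithm:desc".toList, "bit_length:asc".toList,
     "bit_length:desc".toList, "created:asc".toList, "created:desc".toList,
     "expiration:asc".toList, "expiration:desc".toList, "mode:asc".toList,
     "mode:desc".toList, "name:asc".toList, "name:desc".toList,
     "secret_type:asc".toList, "secret_type:desc".toList, "status:asc".toList,
     "status:desc".toList, "updated:asc".toList, "updated:desc".toList] := by
  rw [PySem.Dict.contains_iff_mem_keys, pv_table_keys]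

-- uniqueness of splitting at the first colon
theorem pv_split_unique : ∀ (a c b d : List Char), ':' ∉ a → ':' ∉ c →
    a ++ ':' :: b = c ++ ':' :: d → a = c ∧ b = d := by
  intro a
  induction a with
  | nil =>
    intro c b d _ hc h
    cases c with
    | nil => simpa using h
    | cons y ys =>
      simp only [List.nil_append, List.cons_append, List.cons.injEq] at h
      exact absurd (h.1 ▸ List.mem_cons_self ..) hc
  | cons x xs ih =>
    intro c b d ha hc h
    cases c with
    | nil =>
      simp only [List.cons_append, List.nil_append, List.cons.injEq] at h
      exact absurd (h.1 ▸ List.mem_cons_self ..) ha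
    | cons y ys =>
      simp only [List.cons_append, List.cons.injEq] at h
      obtain ⟨hxy, hrest⟩ := h
      have h1 : ':' ∉ xs := fun h' => ha (List.mem_cons_of_mem _ h')
      have h2 : ':' ∉ ys := fun h' => hc (List.mem_cons_of_mem _ h')
      obtain ⟨he, hbd⟩ := ih ys b d h1 h2 hrest
      exact ⟨by rw [hxy, he], hbd⟩

-- the two shapes a table token can take, matched against the first-colon split
theorem pv_asc_case (s k : List Char) (hs : ':' ∉ s) (hk : ':' ∉ k)
    (h : s ++ ":asc".toList = k ++ ':' :: "asc".toList) : s = k :=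
  (pv_split_unique s k "asc".toList "asc".toList hs hk h).1

theorem pv_desc_case (s k : List Char) (hs : ':' ∉ s) (hk : ':' ∉ k)
    (h : s ++ ":asc".toList = k ++ ':' :: "desc".toList) : False := by
  have h2 := (pv_split_unique s k "asc".toList "desc".toList hs hk h).2
  exact absurd h2 (by decide)

-- contains on a colon-free part with ':asc' appended = key membership
theorem pv_tok_nocolon (s : List Char) (hs : ':' ∉ s) :
    pvTokenTable.contains (s ++ ":asc".toList) = pvAllowedKeysA.contains s := by
  by_cases hk : pvAllowedKeysA.contains s = true
  · rw [hk]
    have hm : s ∈ pvAllowedKeysA := by simpa using hk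
    fin_cases hm <;> decide
  · rw [Bool.not_eq_true] at hk
    rw [hk]
    rcases hc : pvTokenTable.contains (s ++ ":asc".toList) with _ | _
    · rfl
    · exfalso
      have hm := (pv_table_mem _).mp hc
      simp only [List.mem_cons, List.not_mem_nil, or_false] at hm
      rw [Bool.eq_false_iff] at hk
      rcases hm with h|h|h|h|h|h|h|h|h|h|h|h|h|h|h|h|h|h
      · exact hk ((pv_asc_case s "algorithm".toList hs (by decide) h) ▸ (by decide))
      · exact pv_desc_case s "algorithm".toList hs (by decide) h
      · exact hk ((pv_asc_case s "bit_length".toList hs (by decide) h) ▸ (by decide))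
      · exact pv_desc_case s "bit_length".toList hs (by decide) h
      · exact hk ((pv_asc_case s "created".toList hs (by decide) h) ▸ (by decide))
      · exact pv_desc_case s "created".toList hs (by decide) h
      · exact hk ((pv_asc_case s "expiration".toList hs (by decide) h) ▸ (by decide))
      · exact pv_desc_case s "expiration".toList hs (by decide) h
      · exact hk ((pv_asc_case s "mode".toList hs (by decide) h) ▸ (by decide))
      · exact pv_desc_case s "mode".toList hs (by decide) h
      · exact hk ((pv_asc_case s "name".toList hs (by decide) h) ▸ (by decide))
      · exact pv_desc_case s "name".toList hs (by decide) h
      · exact hk ((pv_asc_case s "secret_type".toList hs (by decide) h) ▸ (by decide))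
      · exact pv_desc_case s "secret_type".toList hs (by decide) h
      · exact hk ((pv_asc_case s "status".toList hs (by decide) h) ▸ (by decide))
      · exact pv_desc_case s "status".toList hs (by decide) h
      · exact hk ((pv_asc_case s "updated".toList hs (by decide) h) ▸ (by decide))
      · exact pv_desc_case s "updated".toList hs (by decide) h

theorem pv_getD_nocolon (s : List Char) (h : pvAllowedKeysA.contains s = true) :
    pvTokenTable.getD (s ++ ":asc".toList) [] = s := by
  have hm : s ∈ pvAllowedKeysA := by simpa using h
  fin_cases hm <;> decide

theorem pv_colon_not_tok (a b : List Char) (ha : ':' ∉ a)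
    (hn : ¬ (pvAllowedKeysA.contains a = true ∧ pvAllowedDirectionsA.contains b = true)) :
    pvTokenTable.contains (a ++ ':' :: b) = false := by
  rcases hc : pvTokenTable.contains (a ++ ':' :: b) with _ | _
  · rfl
  · exfalso
    have hm := (pv_table_mem _).mp hc
    simp only [List.mem_cons, List.not_mem_nil, or_false] at hm
    rcases hm with h|h|h|h|h|h|h|h|h|h|h|h|h|h|h|h|h|h
    · obtain ⟨h1, h2⟩ := pv_split_unique a "algorithm".toList b "asc".toList ha (by decide) h
      exact hn ⟨h1 ▸ (by decide), h2 ▸ (by decide)⟩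
    · obtain ⟨h1, h2⟩ := pv_split_unique a "algorithm".toList b "desc".toList ha (by decide) h
      exact hn ⟨h1 ▸ (by decide), h2 ▸ (by decide)⟩
    · obtain ⟨h1, h2⟩ := pv_split_unique a "bit_length".toList b "asc".toList ha (by decide) h
      exact hn ⟨h1 ▸ (by decide), h2 ▸ (by decide)⟩
    · obtain ⟨h1, h2⟩ := pv_split_unique a "bit_length".toList b "desc".toList ha (by decide) h
      exact hn ⟨h1 ▸ (by decide), h2 ▸ (by decide)⟩
    · obtain ⟨h1, h2⟩ := pv_split_unique a "created".toList b "asc".toList ha (by decide) h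
      exact hn ⟨h1 ▸ (by decide), h2 ▸ (by decide)⟩
    · obtain ⟨h1, h2⟩ := pv_split_unique a "created".toList b "desc".toList ha (by decide) h
      exact hn ⟨h1 ▸ (by decide), h2 ▸ (by decide)⟩
    · obtain ⟨h1, h2⟩ := pv_split_unique a "expiration".toList b "asc".toList ha (by decide) h
      exact hn ⟨h1 ▸ (by decide), h2 ▸ (by decide)⟩
    · obtain ⟨h1, h2⟩ := pv_split_unique a "expiration".toList b "desc".toList ha (by decide) h
      exact hn ⟨h1 ▸ (by decide), h2 ▸ (by decide)⟩
    · obtain ⟨h1, h2⟩ := pv_split_unique a "mode".toList b "asc".toList ha (by decide) h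
      exact hn ⟨h1 ▸ (by decide), h2 ▸ (by decide)⟩
    · obtain ⟨h1, h2⟩ := pv_split_unique a "mode".toList b "desc".toList ha (by decide) h
      exact hn ⟨h1 ▸ (by decide), h2 ▸ (by decide)⟩
    · obtain ⟨h1, h2⟩ := pv_split_unique a "name".toList b "asc".toList ha (by decide) h
      exact hn ⟨h1 ▸ (by decide), h2 ▸ (by decide)⟩
    · obtain ⟨h1, h2⟩ := pv_split_unique a "name".toList b "desc".toList ha (by decide) h
      exact hn ⟨h1 ▸ (by decide), h2 ▸ (by decide)⟩
    · obtain ⟨h1, h2⟩ := pv_split_unique a "secret_type".toList b "asc".toList ha (by decide) h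
      exact hn ⟨h1 ▸ (by decide), h2 ▸ (by decide)⟩
    · obtain ⟨h1, h2⟩ := pv_split_unique a "secret_type".toList b "desc".toList ha (by decide) h
      exact hn ⟨h1 ▸ (by decide), h2 ▸ (by decide)⟩
    · obtain ⟨h1, h2⟩ := pv_split_unique a "status".toList b "asc".toList ha (by decide) h
      exact hn ⟨h1 ▸ (by decide), h2 ▸ (by decide)⟩
    · obtain ⟨h1, h2⟩ := pv_split_unique a "status".toList b "desc".toList ha (by decide) h
      exact hn ⟨h1 ▸ (by decide), h2 ▸ (by decide)⟩
    · obtain ⟨h1, h2⟩ := pv_split_unique a "updated".toList b "asc".toList ha (by decide) h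
      exact hn ⟨h1 ▸ (by decide), h2 ▸ (by decide)⟩
    · obtain ⟨h1, h2⟩ := pv_split_unique a "updated".toList b "desc".toList ha (by decide) h
      exact hn ⟨h1 ▸ (by decide), h2 ▸ (by decide)⟩

theorem pv_tok_colon (a b : List Char) (ha : ':' ∉ a) (hb : ':' ∉ b) :
    pvTokenTable.contains (a ++ ':' :: b)
      = (pvAllowedKeysA.contains a && pvAllowedDirectionsA.contains b) := by
  by_cases hka : pvAllowedKeysA.contains a = true
  · by_cases hkb : pvAllowedDirectionsA.contains b = true
    · rw [hka, hkb]
      have hma : a ∈ pvAllowedKeysA := by simpa using hka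
      have hmb : b ∈ pvAllowedDirectionsA := by simpa using hkb
      fin_cases hma <;> fin_cases hmb <;> decide
    · rw [pv_colon_not_tok a b ha (fun hp => hkb hp.2)]
      rw [Bool.not_eq_true] at hkb
      rw [hkb, Bool.and_false]
  · rw [pv_colon_not_tok a b ha (fun hp => hka hp.1)]
    rw [Bool.not_eq_true] at hka
    rw [hka, Bool.false_and]

theorem pv_getD_colon (a b : List Char) (ha : pvAllowedKeysA.contains a = true)
    (hb : pvAllowedDirectionsA.contains b = true) :
    pvTokenTable.getD (a ++ ':' :: b) [] = a := by
  have hma : a ∈ pvAllowedKeysA := by simpa using ha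
  have hmb : b ∈ pvAllowedDirectionsA := by simpa using hb
  fin_cases hma <;> fin_cases hmb <;> decide

theorem pv_tok_two (s : List Char) (h : 2 ≤ s.count ':') :
    pvTokenTable.contains s = false := by
  rcases hb : pvTokenTable.contains s with _ | _
  · rfl
  · exfalso
    have hm := (pv_table_mem s).mp hb
    fin_cases hm <;> revert h <;> decide

-- set(xs) (first occurrences) is a sublist of xs
theorem pv_ofList_sublist {α : Type} [BEq α] (xs : List α) :
    (PySem.Set.ofList xs).Sublist xs := by
  have key : ∀ (ys : List α) (s : PySem.Set α),
      ∃ t, List.foldl PySem.Set.add s ys = s ++ t ∧ t.Sublist ys := by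
    intro ys
    induction ys with
    | nil => intro s; exact ⟨[], by simp, by simp⟩
    | cons y ys ih =>
      intro s
      rcases ih (PySem.Set.add s y) with ⟨t, ht, hs⟩
      by_cases hc : PySem.Set.contains s y = true
      · have he : PySem.Set.add s y = s := by simp only [PySem.Set.add, if_pos hc]
        exact ⟨t, by simpa [he] using ht, hs.cons y⟩
      · have he : PySem.Set.add s y = s ++ [y] := by simp only [PySem.Set.add, if_neg hc]
        refine ⟨y :: t, ?_, hs.cons₂ y⟩
        rw [he] at ht
        rw [List.foldl_cons, he]
        simpa using ht
  rcases key xs [] with ⟨t, ht, hs⟩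
  rw [PySem.Set.ofList_eq_foldl, ht]; simpa using hs

theorem pv_len_ofList_iff (xs : List (List Char)) :
    ((xs.length : Int) = PySem.Set.len (PySem.Set.ofList xs)) ↔ xs.Nodup := by
  constructor
  · intro h
    have hlen : (PySem.Set.ofList xs).length = xs.length := by
      simpa [PySem.Set.len] using h.symm
    have := (pv_ofList_sublist xs).eq_of_length hlen
    rw [← this]; exact PySem.Set.nodup_ofList xs
  · intro h
    rw [PySem.Set.ofList_eq_self_of_nodup xs h]; simp [PySem.Set.len]

theorem pv_dirs_nonempty (direction : List Char)
    (h : pvAllowedDirectionsA.contains direction = true) : direction ≠ [] := by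
  intro hnil; subst hnil; revert h; decide

-- duplicate already collected: B's final cardinality test fails whatever follows
theorem pv_dup_false (acc keys' : List (List Char)) (key : List Char)
    (h : ¬ (acc ++ [key]).Nodup) (cond : Bool) :
    (if cond then
       decide (((acc ++ key :: keys').length : Int)
         = PySem.Set.len (PySem.Set.ofList (acc ++ key :: keys'))) else false) = false := by
  cases cond
  · simp
  · simp only [if_true, decide_eq_false_iff_not]
    intro heq
    have hnd := (pv_len_ofList_iff _).mp heq
    have hsub : (acc ++ [key]).Sublist (acc ++ key :: keys') := by
      rw [show acc ++ key :: keys' = (acc ++ [key]) ++ keys' by simp]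
      exact List.sublist_append_left _ _
    exact h (hnd.sublist hsub)

-- the common per-part step once the part's token, key and direction are identified
theorem pv_step (rest : List (List Char)) (d : PySem.Dict (List Char) (List Char))
    (acc : List (List Char)) (key direction tok : List Char)
    (hkeys : d.keys = acc) (hnd : acc.Nodup)
    (hval : ∀ k v, d.get? k = some v → v ≠ [])
    (hcont : pvTokenTable.contains tok
      = (pvAllowedKeysA.contains key && pvAllowedDirectionsA.contains direction))
    (hget : pvAllowedKeysA.contains key = true → pvAllowedDirectionsA.contains direction = true →
      pvTokenTable.getD tok [] = key)
    (ih : ∀ (d : PySem.Dict (List Char) (List Char)) (acc : List (List Char)),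
      d.keys = acc → acc.Nodup → (∀ k v, d.get? k = some v → v ≠ []) →
      pvALoop d rest =
        (if ((rest.map pvNorm).all fun t => pvTokenTable.contains t) = true then
          decide ((((acc ++ (rest.map pvNorm).map fun t => pvTokenTable.getD t []).length : Int))
            = PySem.Set.len (PySem.Set.ofList (acc ++ (rest.map pvNorm).map fun t => pvTokenTable.getD t [])))
        else false)) :
    (if !(pvAllowedKeysA.contains key) || !(pvAllowedDirectionsA.contains direction) then false
     else if (d.getD key []) ≠ [] then false
     else pvALoop (d.insert key direction) rest)
    = (if (pvTokenTable.contains tok && ((rest.map pvNorm).all fun t => pvTokenTable.contains t)) = true then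
        decide ((((acc ++ pvTokenTable.getD tok [] :: ((rest.map pvNorm).map fun t => pvTokenTable.getD t [])).length : Int))
          = PySem.Set.len (PySem.Set.ofList (acc ++ pvTokenTable.getD tok [] :: ((rest.map pvNorm).map fun t => pvTokenTable.getD t []))))
      else false) := by
  by_cases hk : pvAllowedKeysA.contains key = true
  · by_cases hd : pvAllowedDirectionsA.contains direction = true
    · rw [hk, hd] at hcont ⊢
      rw [hcont, hget hk hd]
      rw [if_neg (show ¬ ((!true || !true) = true) by simp)]
      simp only [Bool.true_and]
      by_cases hmem : key ∈ acc
      · -- duplicate key: A fails at the dict, B at the final cardinality check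
        have hcontd : d.contains key = true :=
          PySem.Dict.contains_iff_mem_keys d key |>.mpr (hkeys ▸ hmem)
        have hgetv : ∃ v, d.get? key = some v := by
          rcases hg : d.get? key with _ | v
          · exact absurd ((PySem.Dict.get?_eq_none_iff_contains d key).mp hg)
              (by simp [hcontd])
          · exact ⟨v, rfl⟩
        rcases hgetv with ⟨v, hv⟩
        have hvne : v ≠ [] := hval key v hv
        have hgd : d.getD key [] = v := by
          rw [PySem.Dict.getD_eq_get?_getD, hv]; rfl
        rw [if_pos (show d.getD key [] ≠ [] from by rw [hgd]; exact hvne)]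
        exact (pv_dup_false acc _ key (by simp [List.nodup_append, hmem]) _).symm
      · -- fresh key: both sides recurse, invariant extended
        have hcontd : d.contains key = false := by
          rcases hcc : d.contains key with _ | _
          · rfl
          · exact absurd (hkeys ▸ (PySem.Dict.contains_iff_mem_keys d key).mp hcc) hmem
        have hgetn : d.get? key = none :=
          (PySem.Dict.get?_eq_none_iff_contains d key).mpr hcontd
        have hgd : d.getD key [] = [] := by
          rw [PySem.Dict.getD_eq_get?_getD, hgetn]; rfl
        rw [if_neg (show ¬ d.getD key [] ≠ [] from by rw [hgd]; simp)]
        have hrec := ih (d.insert key direction) (acc ++ [key])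
          (by rw [PySem.Dict.keys_insert_of_not_contains d direction hcontd, hkeys])
          (by
            refine List.nodup_append.mpr ⟨hnd, List.nodup_singleton key, ?_⟩
            intro a ha b hb
            rw [List.mem_singleton.mp hb]
            exact fun heq => hmem (heq ▸ ha))
          (by
            intro k v hkv
            rw [PySem.Dict.get?_insert] at hkv
            by_cases hkk : k = key
            · rw [if_pos hkk] at hkv
              cases hkv
              exact pv_dirs_nonempty direction hd
            · rw [if_neg hkk] at hkv
              exact hval k v hkv)
        rw [hrec]
        rw [show (acc ++ [key]) ++ ((rest.map pvNorm).map fun t => pvTokenTable.getD t [])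
              = acc ++ key :: ((rest.map pvNorm).map fun t => pvTokenTable.getD t []) by
            simp [List.append_assoc]]
    · rw [Bool.not_eq_true] at hd
      rw [hk, hd] at hcont ⊢
      rw [hcont]
      rw [if_pos (show (!true || !false) = true by simp)]
      simp
  · rw [Bool.not_eq_true] at hk
    rw [hk] at hcont ⊢
    rw [hcont]
    rw [if_pos (show (!false || !(pvAllowedDirectionsA.contains direction)) = true by simp)]
    simp

-- main loop invariant: A's dict keys are exactly the keys B has collected so far
theorem pv_main : ∀ (parts : List (List Char)) (d : PySem.Dict (List Char) (List Char))
    (acc : List (List Char)), d.keys = acc → acc.Nodup →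
    (∀ k v, d.get? k = some v → v ≠ []) →
    pvALoop d parts =
      (if (parts.map pvNorm).all (fun t => pvTokenTable.contains t) then
        decide ((((acc ++ (parts.map pvNorm).map (fun t => pvTokenTable.getD t [])).length : Int))
          = PySem.Set.len (PySem.Set.ofList (acc ++ (parts.map pvNorm).map (fun t => pvTokenTable.getD t []))))
      else false) := by
  intro parts
  induction parts with
  | nil =>
    intro d acc hkeys hnd hval
    simp only [pvALoop, List.map_nil, List.all_nil, if_true, List.append_nil]
    exact (decide_eq_true ((pv_len_ofList_iff acc).mpr hnd)).symm
  | cons sort rest ih =>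
    intro d acc hkeys hnd hval
    simp only [List.map_cons, List.all_cons]
    rcases hsp0 : pvSplit ':' sort with _ | ⟨a, _ | ⟨b, _ | ⟨z, t⟩⟩⟩
    · exact absurd hsp0 (pvSplit_ne_nil ':' sort)
    · -- one piece: no colon, key = sort, direction = 'asc'
      obtain ⟨hsa, hmem⟩ := pvSplit_singleton ':' sort a hsp0
      subst hsa
      have hii := pv_isIn_false ':' sort hmem
      have hnorm : pvNorm sort = sort ++ ":asc".toList := by simp [pvNorm, hii]
      simp only [pvALoop, hii, Bool.false_eq_true, if_false, hnorm]
      exact pv_step rest d acc sort "asc".toList (sort ++ ":asc".toList) hkeys hnd hval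
        (by rw [pv_tok_nocolon sort hmem]
            rw [show pvAllowedDirectionsA.contains "asc".toList = true by decide, Bool.and_true])
        (fun hk _ => pv_getD_nocolon sort hk)
        ih
    · -- two pieces: exactly one colon, sort = a ++ ':' :: b
      obtain ⟨hsab, hna, hnb⟩ := pvSplit_pair ':' sort a b hsp0
      have hmem : ':' ∈ sort := by rw [hsab]; simp
      have hii := pv_isIn_true ':' sort hmem
      have hnorm : pvNorm sort = sort := by simp [pvNorm, hii]
      simp only [pvALoop, hii, if_true, pv_splitOn_eq, hsp0, hnorm]
      exact pv_step rest d acc a b sort hkeys hnd hval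
        (by rw [hsab]; exact pv_tok_colon a b hna hnb)
        (fun hk hd => by rw [hsab]; exact pv_getD_colon a b hk hd)
        ih
    · -- three or more pieces: both sides reject this part
      have hcnt : 2 ≤ sort.count ':' := by
        have := pvSplit_length ':' sort
        rw [hsp0] at this
        simp only [List.length_cons] at this
        omega
      have hmem : ':' ∈ sort := List.count_pos_iff.mp (by omega)
      have hii := pv_isIn_true ':' sort hmem
      have hnorm : pvNorm sort = sort := by simp [pvNorm, hii]
      simp only [pvALoop, hii, if_true, pv_splitOn_eq, hsp0, hnorm]
      rw [pv_tok_two sort hcnt]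
      simp

-- ===== VERDICT (by name: the statement is the Claim_ definition above) =====
theorem is_valid_sorting_py_spec : Claim_equal_is_valid_sorting_py := by
  intro sorting _
  unfold Spec_is_valid_sorting_py is_valid_sorting_py is_valid_sorting_py_alt
  have := pv_main (PySem.Chars.splitOn sorting.toList [',']) PySem.Dict.empty []
    (by simp) List.nodup_nil
    (fun k v h => by simp [PySem.Dict.get?_empty] at h)
  simpa using this
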